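-- pv_equiv track=rewrite | github.com/hgs3896/codetree-TILs | 240131/백만제곱 크기의 격자/a-grid-that's-a-million-square.py | process
-- ===== SOURCE A (Python) =====
-- from typing import Tuple, Dict, TypeAlias, Generator
-- from collections import deque
--
-- Coordinate: TypeAlias = Tuple[int, int]
--
-- CoordinateGenerator: TypeAlias = Generator[Coordinate, None, None]
--
-- DR: Tuple[int, int, int, int] = (0, 1, 0,-1)
--
-- DC: Tuple[int, int, int, int] = (1, 0,-1, 0)
--
-- def process(coords: Dict[Coordinate, bool]):
--     dq = deque()
--     visited = set()
--
--     def around(r, c) -> CoordinateGenerator: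
--         for dr, dc in zip(DR, DC):
--             nr, nc = r+dr, c+dc
--             if (nr, nc) in coords:
--                 continue
--             yield nr, nc
--
--     def exceptCoord(g: CoordinateGenerator) -> CoordinateGenerator:
--         for r, c in g:
--             if (r, c) in coords:
--                 continue
--             yield r, c
--
--     def exceptVisited(g: CoordinateGenerator) -> CoordinateGenerator:
--         for r, c in g:
--             if (r, c) in visited:
--                 continue
--             yield r, c
--
--     # Traverse groups by BFS
--     # O(V+E) = O(V)
--     groups = []
--     for start in coords:
--         if coords[start]:
--             continue
--         groups.append(start)
--
--         dq.append(start)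
--         coords[start] = True
--         while dq:
--             r, c = dq.popleft()
--             for dr, dc in zip(DR, DC):
--                 nr, nc = r+dr, c+dc
--                 if (nr, nc) not in coords:
--                     continue
--                 if coords[(nr, nc)]:
--                     continue
--                 groups[-1] = min(groups[-1], (nr, nc))
--                 dq.append((nr, nc))
--                 coords[(nr, nc)] = True
--
--     count_nearby_groups = lambda r, c: sum((r+dr, c+dc) in coords for dr, dc in zip(DR, DC))
--     has_any_groups = lambda r, c: any((r+dr, c+dc) in coords for dr in range(-1, 2) for dc in range(-1, 2) if (dr, dc) != (0, 0))
--
--     # Count outer groups by multi-starting points BFS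
--     total_outer_groups = 0
--     for group_coord in groups:
--         for nr, nc in exceptCoord(around(*group_coord)):
--             dq.append((nr, nc))
--             visited.add((nr, nc))
--
--     while dq:
--         r, c = dq.popleft()
--
--         total_outer_groups += count_nearby_groups(r, c)
--         for nr, nc in exceptVisited(exceptCoord(around(r, c))):
--             visited.add((nr, nc))
--             if has_any_groups(nr, nc):
--                 dq.append((nr, nc))
--
--     return total_outer_groups
-- ===== SOURCE B (Python) =====
-- # B: phase 1 (grouping) done by queue-free level-saturation closure over the initially-False
-- # cells instead of A's deque BFS with in-dict marking; phase 2 (the outer boundary flood that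
-- # determines the return value) kept as in A.  Like A, mutates coords: all values become True.
-- DR = (0, 1, 0, -1)
-- DC = (1, 0, -1, 0)
--
-- def process(coords):
--     ks = list(coords)
--     false_keys = [k for k in ks if not coords[k]]
--     fset = set(false_keys)
--
--     # group the initially-False cells into 4-connected components by saturation
--     groups = []
--     assigned = set()
--     for start in false_keys:
--         if start in assigned:
--             continue
--         comp = {start}
--         for _ in range(len(false_keys)):
--             nxt = comp | {(r + dr, c + dc)
--                           for (r, c) in comp
--                           for dr, dc in zip(DR, DC)
--                           if (r + dr, c + dc) in fset}
--             if len(nxt) == len(comp):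
--                 break
--             comp = nxt
--         groups.append(min(comp))
--         assigned |= comp
--
--     # same side effect as A: every value of coords ends up True
--     for k in ks:
--         coords[k] = True
--
--     dq = []
--     visited = set()
--
--     def around(r, c):
--         for dr, dc in zip(DR, DC):
--             nr, nc = r + dr, c + dc
--             if (nr, nc) in coords:
--                 continue
--             yield nr, nc
--
--     def exceptCoord(g):
--         for r, c in g:
--             if (r, c) in coords:
--                 continue
--             yield r, c
--
--     def exceptVisited(g):
--         for r, c in g:
--             if (r, c) in visited:
--                 continue
--             yield r, c
--
--     count_nearby_groups = lambda r, c: sum((r+dr, c+dc) in coords for dr, dc in zip(DR, DC))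
--     has_any_groups = lambda r, c: any((r+dr, c+dc) in coords for dr in range(-1, 2) for dc in range(-1, 2) if (dr, dc) != (0, 0))
--
--     # outer multi-source boundary flood, exactly as in A
--     total_outer_groups = 0
--     for group_coord in groups:
--         for nr, nc in exceptCoord(around(*group_coord)):
--             dq.append((nr, nc))
--             visited.add((nr, nc))
--
--     i = 0
--     while i < len(dq):
--         r, c = dq[i]
--         i += 1
--         total_outer_groups += count_nearby_groups(r, c)
--         for nr, nc in exceptVisited(exceptCoord(around(r, c))):
--             visited.add((nr, nc))
--             if has_any_groups(nr, nc):
--                 dq.append((nr, nc))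
--
--     return total_outer_groups
-- ===== Notes on version B (the rewrite author's own statement) =====
-- stated objective: alternative
-- what changed: The grouping phase is re-done as a queue-free fixed-point saturation: per component, repeatedly union in the 4-neighbours of the current cell set until it stops growing, then take min(comp), instead of A's deque BFS that marks visited cells by mutating the dict values and tracks the running minimum during traversal; the outer boundary flood (phase 2), which produces the returned total, is unchanged.
import Mathlib
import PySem

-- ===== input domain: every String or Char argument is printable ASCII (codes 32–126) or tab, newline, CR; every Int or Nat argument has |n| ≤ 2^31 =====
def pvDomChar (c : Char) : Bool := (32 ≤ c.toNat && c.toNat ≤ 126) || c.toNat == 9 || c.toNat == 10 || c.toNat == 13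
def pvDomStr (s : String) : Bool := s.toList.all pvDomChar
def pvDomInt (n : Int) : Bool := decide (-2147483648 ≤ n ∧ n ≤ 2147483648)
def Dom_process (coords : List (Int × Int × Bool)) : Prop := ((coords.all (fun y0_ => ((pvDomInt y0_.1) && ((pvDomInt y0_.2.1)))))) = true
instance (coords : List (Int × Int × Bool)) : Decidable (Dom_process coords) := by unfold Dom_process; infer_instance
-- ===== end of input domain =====

-- B changes only the grouping phase (saturation closure instead of deque BFS with in-dict marks);
-- the boundary flood that computes the returned total is the same code in both Pythons, so both
-- ports share its transliteration (phase2).  Equivalence is about the RETURN value; both Pythons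
-- perform the same side effect (every value of coords becomes True).

-- ===== SHARED HELPERS (code that is textually identical in Source A and Source B) =====

-- the Python dict argument as a PySem.Dict (insertion order, last value wins)
def buildDict (coords : List (Int × Int × Bool)) : PySem.Dict (Int × Int) Bool :=
  coords.foldl (fun d t => d.insert (t.1, t.2.1) t.2.2) PySem.Dict.empty

-- the four neighbours (r+dr, c+dc) for (dr,dc) in zip(DR, DC) = (0,1),(1,0),(0,-1),(-1,0)
def nbrs (p : Int × Int) : List (Int × Int) :=
  [(p.1, p.2 + 1), (p.1 + 1, p.2), (p.1, p.2 - 1), (p.1 - 1, p.2)]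

-- Python min(a, b) on int pairs (lexicographic; returns a on ties)
def pyMin2 (a b : Int × Int) : Int × Int :=
  if b.1 < a.1 ∨ (b.1 = a.1 ∧ b.2 < a.2) then b else a

-- count_nearby_groups: sum of booleans '(r+dr, c+dc) in coords' (keys of coords = ks, fixed here)
def countNearby (ks : List (Int × Int)) (p : Int × Int) : Int :=
  ((nbrs p).map (fun n => if n ∈ ks then (1 : Int) else 0)).sum

-- has_any_groups: any((r+dr, c+dc) in coords for dr in range(-1,2) for dc in range(-1,2) if (dr,dc) != (0,0))
def hasAny (ks : List (Int × Int)) (p : Int × Int) : Bool :=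
  (PySem.List.pyRange (-1) 2 1).any (fun dr =>
    (PySem.List.pyRange (-1) 2 1).any (fun dc =>
      !decide ((dr, dc) = ((0 : Int), (0 : Int))) && decide ((p.1 + dr, p.2 + dc) ∈ ks)))

-- the 'while dq' loop of the outer flood; dict keys never change there, so membership in coords
-- is membership in ks.  Fuel: every appended cell is first added to visited and lies in the
-- 8-neighbourhood of ks, so iterations ≤ |seeds| + 8·|ks|; the fuel given by phase2 exceeds that.
def phase2Loop (ks : List (Int × Int)) : Nat → List (Int × Int) → PySem.Set (Int × Int) → Int → Int
  | 0, _, _, total => total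
  | _ + 1, [], _, total => total
  | fuel + 1, p :: dq, vis, total =>
    let s := (nbrs p).foldl
      (fun (s : List (Int × Int) × PySem.Set (Int × Int)) n =>
        if n ∈ ks then s
        else if n ∈ s.2 then s
        else ((if hasAny ks n then s.1 ++ [n] else s.1), PySem.Set.add s.2 n))
      (dq, vis)
    phase2Loop ks fuel s.1 s.2 (total + countNearby ks p)

-- seeding from the group representatives, then the flood ('around' already skips cells in
-- coords, so the extra exceptCoord filter of the Python is the same filter applied twice)
def phase2 (ks : List (Int × Int)) (groups : List (Int × Int)) : Int :=
  let seeds := groups.flatMap (fun g => (nbrs g).filter (fun n => !decide (n ∈ ks)))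
  phase2Loop ks (seeds.length + 9 * ks.length + 9) seeds (PySem.Set.ofList seeds) 0

-- ===== PORT A =====

-- body of A's inner BFS loop over the four neighbours: membership test, mark test, then
-- groups[-1] = min(groups[-1], n); dq.append(n); coords[n] = True
def bfsStep (s : PySem.Dict (Int × Int) Bool × List (Int × Int) × (Int × Int)) (n : Int × Int) :
    PySem.Dict (Int × Int) Bool × List (Int × Int) × (Int × Int) :=
  if s.1.contains n then
    if s.1.getD n false then s
    else (s.1.insert n true, s.2.1 ++ [n], pyMin2 s.2.2 n)
  else s

-- A's 'while dq' BFS; values only ever flip False→True, so iterations ≤ 1 + |ks| and the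
-- fuel ks.length + 2 passed by phase1A never runs out
def bfsA (ks : List (Int × Int)) : Nat → PySem.Dict (Int × Int) Bool → List (Int × Int) →
    (Int × Int) → PySem.Dict (Int × Int) Bool × (Int × Int)
  | 0, d, _, rep => (d, rep)
  | _ + 1, d, [], rep => (d, rep)
  | fuel + 1, d, p :: dq, rep =>
    let s := (nbrs p).foldl bfsStep (d, dq, rep)
    bfsA ks fuel s.1 s.2.1 s.2.2

-- 'for start in coords: if coords[start]: continue; …' (keys never change: they are ks)
def phase1A (ks : List (Int × Int)) (d0 : PySem.Dict (Int × Int) Bool) :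
    PySem.Dict (Int × Int) Bool × List (Int × Int) :=
  ks.foldl
    (fun s start =>
      if s.1.getD start false then s
      else
        let r := bfsA ks (ks.length + 2) (s.1.insert start true) [start] start
        (r.1, s.2 ++ [r.2]))
    (d0, [])

def process (coords : List (Int × Int × Bool)) : Int :=
  let d := buildDict coords
  let ks := d.keys
  let r := phase1A ks d
  phase2 ks r.2

-- ===== PORT B =====

-- comp | {(r+dr, c+dc) for (r,c) in comp for dr,dc in zip(DR,DC) if (r+dr,c+dc) in fset}
def expandB (fk : List (Int × Int)) (s : PySem.Set (Int × Int)) : PySem.Set (Int × Int) :=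
  s.foldl
    (fun acc p =>
      (nbrs p).foldl (fun acc n => if n ∈ fk then PySem.Set.add acc n else acc) acc)
    s

-- the bounded 'for _ in range(len(false_keys))' loop with its 'if len(nxt) == len(comp): break'
def saturateB (fk : List (Int × Int)) : Nat → PySem.Set (Int × Int) → PySem.Set (Int × Int)
  | 0, s => s
  | n + 1, s =>
    let t := expandB fk s
    if t.length = s.length then s else saturateB fk n t

-- Python min of a nonempty collection of int pairs
def minList : List (Int × Int) → (Int × Int)
  | [] => (0, 0)
  | x :: xs => xs.foldl pyMin2 x

-- the grouping loop of Source B: saturation closure per not-yet-assigned False cell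
def phase1B (fk : List (Int × Int)) : List (Int × Int) :=
  (fk.foldl
    (fun (s : PySem.Set (Int × Int) × List (Int × Int)) start =>
      if start ∈ s.1 then s
      else
        let comp := saturateB fk fk.length (PySem.Set.ofList [start])
        (PySem.Set.update s.1 comp, s.2 ++ [minList comp]))
    (PySem.Set.empty, [])).2

def process_alt (coords : List (Int × Int × Bool)) : Int :=
  let d := buildDict coords
  let ks := d.keys
  let fk := ks.filter (fun k => !(d.getD k false))
  phase2 ks (phase1B fk)

-- ===== PRECONDITION & SPEC =====
def Spec_process (coords : List (Int × Int × Bool)) (out : Int) : Prop := out = process_alt coords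
instance (coords : List (Int × Int × Bool)) (out : Int) : Decidable (Spec_process coords out) := by unfold Spec_process; infer_instance

-- ===== CLAIM (what is proved, stated in full; the proofs are below) =====
def Claim_equal_process : Prop := ∀ (coords : List (Int × Int × Bool)), Dom_process coords → Spec_process coords (process coords)

-- ===== LEMMAS AND PROOFS =====

-- 4-adjacency on the grid
def adj (a b : Int × Int) : Prop := b ∈ nbrs a

-- reachability from s through cells satisfying P
inductive ReachP (P : Int × Int → Prop) (s : Int × Int) : Int × Int → Prop
  | refl : ReachP P s s
  | tail {b c : Int × Int} : ReachP P s b → P c → adj b c → ReachP P s c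

theorem nbrs_nodup (p : Int × Int) : (nbrs p).Nodup := by
  obtain ⟨r, c⟩ := p
  simp [nbrs, Prod.ext_iff]
  omega

theorem adj_symm {a b : Int × Int} (h : adj a b) : adj b a := by
  obtain ⟨x, y⟩ := a; obtain ⟨u, v⟩ := b
  simp only [adj, nbrs, List.mem_cons, List.not_mem_nil, or_false, Prod.mk.injEq] at h ⊢
  omega

theorem reach_mono {P Q : Int × Int → Prop} (h : ∀ y, P y → Q y) {s y : Int × Int}
    (hr : ReachP P s y) : ReachP Q s y := by
  induction hr with
  | refl => exact .refl
  | tail _ hc hadj ih => exact .tail ih (h _ hc) hadj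

theorem reach_elem {P : Int × Int → Prop} {s y : Int × Int} (hr : ReachP P s y) :
    y = s ∨ P y := by
  induction hr with
  | refl => exact .inl rfl
  | tail _ hc _ _ => exact .inr hc

theorem reach_subset_of_closed {P T : Int × Int → Prop} {s : Int × Int}
    (hs : T s) (hcl : ∀ y z, T y → P z → adj y z → T z) :
    ∀ y, ReachP P s y → T y := by
  intro y hr
  induction hr with
  | refl => exact hs
  | tail _ hc hadj ih => exact hcl _ _ ih hc hadj

theorem reach_restrict {P A : Int × Int → Prop} {s : Int × Int}
    (hA : ∀ y z, A y → P z → adj y z → A z) (hsA : ¬ A s) (hPs : P s) :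
    ∀ y, ReachP P s y → ReachP (fun z => P z ∧ ¬ A z) s y ∧ ¬ A y := by
  intro y hr
  induction hr with
  | refl => exact ⟨.refl, hsA⟩
  | @tail b c hb hc hadj ih =>
    have hPb : P b := by
      rcases reach_elem hb with h | h
      · rw [h]; exact hPs
      · exact h
    have hcA : ¬ A c := fun hcA => ih.2 (hA c b hcA hPb (adj_symm hadj))
    exact ⟨.tail ih.1 ⟨hc, hcA⟩ hadj, hcA⟩

-- lexicographic order facts
def pleP (a b : Int × Int) : Prop := a.1 < b.1 ∨ (a.1 = b.1 ∧ a.2 ≤ b.2)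

theorem pleP_refl (a : Int × Int) : pleP a a := by simp [pleP]

theorem pleP_trans {a b c : Int × Int} (h1 : pleP a b) (h2 : pleP b c) : pleP a c := by
  simp only [pleP] at *; omega

theorem pleP_antisymm {a b : Int × Int} (h1 : pleP a b) (h2 : pleP b a) : a = b := by
  obtain ⟨x, y⟩ := a; obtain ⟨u, v⟩ := b
  simp only [pleP, Prod.ext_iff] at *; omega

theorem pyMin2_eq_or (a b : Int × Int) : pyMin2 a b = a ∨ pyMin2 a b = b := by
  unfold pyMin2; split <;> simp

theorem pyMin2_le_left (a b : Int × Int) : pleP (pyMin2 a b) a := by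
  unfold pyMin2; split
  · simp only [pleP]; omega
  · exact pleP_refl a

theorem pyMin2_le_right (a b : Int × Int) : pleP (pyMin2 a b) b := by
  unfold pyMin2; split
  · exact pleP_refl b
  · simp only [pleP] at *; omega

theorem foldl_pyMin2 (l : List (Int × Int)) (a : Int × Int) :
    (l.foldl pyMin2 a = a ∨ l.foldl pyMin2 a ∈ l) ∧ pleP (l.foldl pyMin2 a) a ∧
      ∀ y ∈ l, pleP (l.foldl pyMin2 a) y := by
  induction l generalizing a with
  | nil => exact ⟨.inl rfl, pleP_refl a, by simp⟩
  | cons x xs ih =>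
    obtain ⟨hmem, hle, hall⟩ := ih (pyMin2 a x)
    refine ⟨?_, ?_, ?_⟩
    · rcases hmem with h | h
      · rcases pyMin2_eq_or a x with h2 | h2
        · exact .inl (by rw [List.foldl_cons, h, h2])
        · exact .inr (by rw [List.foldl_cons, h, h2]; exact List.mem_cons_self)
      · exact .inr (by rw [List.foldl_cons]; exact List.mem_cons_of_mem _ h)
    · exact pleP_trans hle (pyMin2_le_left a x)
    · intro y hy
      rcases List.mem_cons.1 hy with rfl | hy
      · exact pleP_trans hle (pyMin2_le_right a y)
      · exact hall y hy

theorem min_ext {S : Int × Int → Prop} {a b : Int × Int}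
    (ha : S a) (hb : S b) (la : ∀ y, S y → pleP a y) (lb : ∀ y, S y → pleP b y) : a = b :=
  pleP_antisymm (la b hb) (lb a ha)

theorem minList_spec {l : List (Int × Int)} (h : l ≠ []) :
    minList l ∈ l ∧ ∀ y ∈ l, pleP (minList l) y := by
  match l with
  | x :: xs =>
    obtain ⟨hmem, hle, hall⟩ := foldl_pyMin2 xs x
    refine ⟨?_, ?_⟩
    · rcases hmem with h | h
      · simp [minList, h]
      · simp [minList, List.mem_cons, h]
    · intro y hy
      rcases List.mem_cons.1 hy with rfl | hy
      · exact hle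
      · exact hall y hy

-- the cells that are open (present with value False) in a given dict state
def openP (ks : List (Int × Int)) (dS : PySem.Dict (Int × Int) Bool) (y : Int × Int) : Prop :=
  y ∈ ks ∧ dS.getD y false = false

theorem bfs_fold (ks : List (Int × Int)) (dS : PySem.Dict (Int × Int) Bool)
    (cands : List (Int × Int)) (hc : cands.Nodup) (d : PySem.Dict (Int × Int) Bool)
    (dq : List (Int × Int)) (rep : Int × Int) (M : Finset (Int × Int))
    (hM : ∀ y, d.getD y false = (dS.getD y false || decide (y ∈ M)))
    (hk : d.keys = ks) :
    (∀ y, (cands.foldl bfsStep (d, dq, rep)).1.getD y false =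
        (dS.getD y false || decide (y ∈ M ∪ (cands.filter (fun n => decide (n ∈ ks ∧ dS.getD n false = false) && !decide (n ∈ M))).toFinset))) ∧
    (cands.foldl bfsStep (d, dq, rep)).1.keys = ks ∧
    (cands.foldl bfsStep (d, dq, rep)).2.1 = dq ++ (cands.filter (fun n => decide (n ∈ ks ∧ dS.getD n false = false) && !decide (n ∈ M))) ∧
    (cands.foldl bfsStep (d, dq, rep)).2.2 = (cands.filter (fun n => decide (n ∈ ks ∧ dS.getD n false = false) && !decide (n ∈ M))).foldl pyMin2 rep := by
  induction cands generalizing d dq rep M with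
  | nil =>
    refine ⟨fun y => ?_, hk, by simp, rfl⟩
    simpa using hM y
  | cons n cs ih =>
    have hcnd : cs.Nodup := hc.of_cons
    have hncs : n ∉ cs := (List.nodup_cons.1 hc).1
    rw [List.foldl_cons, List.filter_cons]
    by_cases hmem : n ∈ ks
    · have hcon : d.contains n = true := by
        rw [PySem.Dict.contains_eq_decide_mem_keys, hk]; exact decide_eq_true hmem
      by_cases hopen : d.getD n false = false
      · -- n is open and unmarked: it gets enqueued and marked
        have hdSn : dS.getD n false = false ∧ n ∉ M := by
          have := hM n
          rw [hopen] at this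
          constructor
          · cases h : dS.getD n false
            · rfl
            · rw [h] at this; simp at this
          · intro hn
            rw [decide_eq_true hn, Bool.or_true] at this; simp at this
        have hpred : (decide (n ∈ ks ∧ dS.getD n false = false) && !decide (n ∈ M)) = true := by
          simp [hmem, hdSn.1, hdSn.2]
        rw [if_pos hpred]
        have hstep : bfsStep (d, dq, rep) n = (d.insert n true, dq ++ [n], pyMin2 rep n) := by
          simp [bfsStep, hcon, hopen]
        rw [hstep]
        have hk' : (d.insert n true).keys = ks := by
          rw [PySem.Dict.keys_insert_of_contains d true hcon, hk]
        have hM' : ∀ y, (d.insert n true).getD y false =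
            (dS.getD y false || decide (y ∈ M ∪ {n})) := by
          intro y
          rw [PySem.Dict.getD_insert]
          by_cases hy : y = n
          · subst hy
            simp [hdSn.1]
          · rw [if_neg hy, hM y]
            have : (y ∈ M ∪ {n}) ↔ y ∈ M := by
              simp [hy]
            rw [decide_eq_decide.2 this]
        obtain ⟨g1, g2, g3, g4⟩ := ih hcnd (d.insert n true) (dq ++ [n]) (pyMin2 rep n) (M ∪ {n}) hM' hk'
        have hfiltereq : (cs.filter (fun m => decide (m ∈ ks ∧ dS.getD m false = false) && !decide (m ∈ M ∪ {n}))) =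
            (cs.filter (fun m => decide (m ∈ ks ∧ dS.getD m false = false) && !decide (m ∈ M))) := by
          apply List.filter_congr
          intro x hx
          have hxn : x ≠ n := fun h => hncs (h ▸ hx)
          have : (x ∈ M ∪ {n}) ↔ x ∈ M := by simp [hxn]
          rw [decide_eq_decide.2 this]
        rw [hfiltereq] at g1 g3 g4
        refine ⟨fun y => ?_, g2, ?_, ?_⟩
        · rw [g1 y]
          have : (y ∈ M ∪ {n} ∪ (cs.filter (fun m => decide (m ∈ ks ∧ dS.getD m false = false) && !decide (m ∈ M))).toFinset) ↔
              (y ∈ M ∪ (n :: cs.filter (fun m => decide (m ∈ ks ∧ dS.getD m false = false) && !decide (m ∈ M))).toFinset) := by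
            simp only [Finset.mem_union, List.mem_toFinset, List.mem_cons, Finset.mem_singleton]
            tauto
          rw [decide_eq_decide.2 this]
        · rw [g3, List.append_assoc, List.singleton_append]
        · rw [g4, List.foldl_cons]
      · -- n is already marked (or was initially True): skipped
        have hopen' : d.getD n false = true := by
          cases h : d.getD n false
          · exact absurd h hopen
          · rfl
        have hpred : (decide (n ∈ ks ∧ dS.getD n false = false) && !decide (n ∈ M)) = false := by
          have := hM n
          rw [hopen'] at this
          by_cases hnM : n ∈ M
          · simp [hnM]
          · rw [decide_eq_false hnM, Bool.or_false] at this
            simp [← this]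
        rw [if_neg (by rw [hpred]; exact Bool.false_ne_true)]
        have hstep : bfsStep (d, dq, rep) n = (d, dq, rep) := by
          simp [bfsStep, hcon, hopen']
        rw [hstep]
        exact ih hcnd d dq rep M hM hk
    · -- n not a key of coords: skipped
      have hcon : d.contains n = false := by
        rw [PySem.Dict.contains_eq_decide_mem_keys, hk]
        exact decide_eq_false hmem
      have hpred : (decide (n ∈ ks ∧ dS.getD n false = false) && !decide (n ∈ M)) = false := by
        simp [hmem]
      rw [if_neg (by rw [hpred]; exact Bool.false_ne_true)]
      have hstep : bfsStep (d, dq, rep) n = (d, dq, rep) := by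
        simp [bfsStep, hcon]
      rw [hstep]
      exact ih hcnd d dq rep M hM hk

theorem bfs_main (ks : List (Int × Int)) (dS : PySem.Dict (Int × Int) Bool) (start : Int × Int) :
    ∀ f (d : PySem.Dict (Int × Int) Bool) (dq : List (Int × Int)) (rep : Int × Int)
      (M : Finset (Int × Int)),
      (∀ y, d.getD y false = (dS.getD y false || decide (y ∈ M))) →
      d.keys = ks →
      (∀ y ∈ M, openP ks dS y) →
      (∀ y ∈ M, ReachP (openP ks dS) start y) →
      (∀ y ∈ dq, y ∈ M) → dq.Nodup →
      (∀ y ∈ M, y ∉ dq → ∀ z, openP ks dS z → adj y z → z ∈ M) →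
      (rep ∈ M ∧ ∀ y ∈ M, pleP rep y) →
      start ∈ M →
      dq.length + ((ks.toFinset.filter (fun y => dS.getD y false = false)) \ M).card ≤ f →
      ∃ M' : Finset (Int × Int),
        (∀ y, y ∈ M' ↔ ReachP (openP ks dS) start y) ∧
        (∀ y, (bfsA ks f d dq rep).1.getD y false = (dS.getD y false || decide (y ∈ M'))) ∧
        (bfsA ks f d dq rep).1.keys = ks ∧
        (bfsA ks f d dq rep).2 ∈ M' ∧
        (∀ y ∈ M', pleP (bfsA ks f d dq rep).2 y) := by
  intro f
  induction f with
  | zero =>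
    intro d dq rep M hM hk hMO hre hdq hnd hcl hrep hs hf
    have hdqnil : dq = [] := List.eq_nil_of_length_eq_zero (by omega)
    subst hdqnil
    refine ⟨M, ?_, hM, hk, hrep.1, hrep.2⟩
    intro y
    exact ⟨fun h => hre y h,
      reach_subset_of_closed hs (fun a z ha hz hadj => hcl a ha (List.not_mem_nil) z hz hadj) y⟩
  | succ f ihf =>
    intro d dq rep M hM hk hMO hre hdq hnd hcl hrep hs hf
    match dq with
    | [] =>
      refine ⟨M, ?_, hM, hk, hrep.1, hrep.2⟩
      intro y
      exact ⟨fun h => hre y h,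
        reach_subset_of_closed hs (fun a z ha hz hadj => hcl a ha (List.not_mem_nil) z hz hadj) y⟩
    | p :: dq' =>
      have hbfs : bfsA ks (f + 1) d (p :: dq') rep =
          bfsA ks f ((nbrs p).foldl bfsStep (d, dq', rep)).1
            ((nbrs p).foldl bfsStep (d, dq', rep)).2.1
            ((nbrs p).foldl bfsStep (d, dq', rep)).2.2 := rfl
      obtain ⟨g1, g2, g3, g4⟩ := bfs_fold ks dS (nbrs p) (nbrs_nodup p) d dq' rep M hM hk
      set news := (nbrs p).filter
        (fun n => decide (n ∈ ks ∧ dS.getD n false = false) && !decide (n ∈ M)) with hnews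
      have hnewsmem : ∀ x ∈ news, (x ∈ ks ∧ dS.getD x false = false) ∧ x ∉ M ∧ adj p x := by
        intro x hx
        rw [hnews, List.mem_filter] at hx
        obtain ⟨hxn, hxp⟩ := hx
        rw [Bool.and_eq_true, decide_eq_true_eq, Bool.not_eq_eq_eq_not, Bool.not_true,
          decide_eq_false_iff_not] at hxp
        exact ⟨hxp.1, hxp.2, hxn⟩
      have hnewsnd : news.Nodup := (nbrs_nodup p).filter _
      have hpM : p ∈ M := hdq p List.mem_cons_self
      set M₂ := M ∪ news.toFinset with hM₂def
      have hnd' : dq'.Nodup := hnd.of_cons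
      rw [hbfs, g3, g4]
      refine ihf _ _ _ M₂ g1 g2 ?_ ?_ ?_ ?_ ?_ ?_ (Finset.mem_union_left _ hs) ?_
      · -- hMO
        intro y hy
        rcases Finset.mem_union.1 hy with h | h
        · exact hMO y h
        · exact ((hnewsmem y (List.mem_toFinset.1 h)).1)
      · -- hre
        intro y hy
        rcases Finset.mem_union.1 hy with h | h
        · exact hre y h
        · obtain ⟨hop, _, hadj⟩ := hnewsmem y (List.mem_toFinset.1 h)
          exact .tail (hre p hpM) hop hadj
      · -- hdq
        intro y hy
        rcases List.mem_append.1 hy with h | h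
        · exact Finset.mem_union_left _ (hdq y (List.mem_cons_of_mem p h))
        · exact Finset.mem_union_right _ (List.mem_toFinset.2 h)
      · -- nodup
        refine List.Nodup.append hnd' hnewsnd ?_
        intro x hx hx2
        exact (hnewsmem x hx2).2.1 (hdq x (List.mem_cons_of_mem p hx))
      · -- closure
        intro y hy hynot z hz hadj
        rcases Finset.mem_union.1 hy with hyM | hynews
        · by_cases hyp : y = p
          · subst hyp
            by_cases hzM : z ∈ M
            · exact Finset.mem_union_left _ hzM
            · refine Finset.mem_union_right _ (List.mem_toFinset.2 ?_)
              rw [hnews, List.mem_filter]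
              refine ⟨hadj, ?_⟩
              rw [Bool.and_eq_true, decide_eq_true_eq, Bool.not_eq_eq_eq_not, Bool.not_true,
                decide_eq_false_iff_not]
              exact ⟨⟨hz.1, hz.2⟩, hzM⟩
          · have hynotdq' : y ∉ dq' := fun h => hynot (List.mem_append_left _ h)
            have : y ∉ p :: dq' := by
              intro h
              rcases List.mem_cons.1 h with h | h
              · exact hyp h
              · exact hynotdq' h
            exact Finset.mem_union_left _ (hcl y hyM this z hz hadj)
        · exact absurd (List.mem_append_right dq' (List.mem_toFinset.1 hynews)) hynot
      · -- rep is the running min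
        obtain ⟨hmm, hml, hma⟩ := foldl_pyMin2 news rep
        constructor
        · rcases hmm with h | h
          · rw [h]; exact Finset.mem_union_left _ hrep.1
          · exact Finset.mem_union_right _ (List.mem_toFinset.2 h)
        · intro y hy
          rcases Finset.mem_union.1 hy with h | h
          · exact pleP_trans hml (hrep.2 y h)
          · exact hma y (List.mem_toFinset.1 h)
      · -- fuel
        have hsub : news.toFinset ⊆
            (ks.toFinset.filter (fun y => dS.getD y false = false)) \ M := by
          intro x hx
          obtain ⟨hop, hnM, _⟩ := hnewsmem x (List.mem_toFinset.1 hx)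
          rw [Finset.mem_sdiff, Finset.mem_filter, List.mem_toFinset]
          exact ⟨⟨hop.1, hop.2⟩, hnM⟩
        have hsd : (ks.toFinset.filter (fun y => dS.getD y false = false)) \ M₂ =
            ((ks.toFinset.filter (fun y => dS.getD y false = false)) \ M) \ news.toFinset := by
          ext x
          simp only [Finset.mem_sdiff, hM₂def, Finset.mem_union]
          tauto
        have hcard : (((ks.toFinset.filter (fun y => dS.getD y false = false)) \ M) \ news.toFinset).card =
            ((ks.toFinset.filter (fun y => dS.getD y false = false)) \ M).card - news.toFinset.card := by
          rw [Finset.card_sdiff, Finset.inter_eq_left.mpr hsub]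
        have hcardle := Finset.card_le_card hsub
        have hlen : news.toFinset.card = news.length := List.toFinset_card_of_nodup hnewsnd
        rw [hsd, hcard, hlen]
        simp only [List.length_append, List.length_cons] at hf ⊢
        omega

-- expansion step: membership, nodup, prefix
theorem inner_fold_mem (fk : List (Int × Int)) (cl : List (Int × Int)) :
    ∀ (acc : PySem.Set (Int × Int)) (y : Int × Int),
      y ∈ cl.foldl (fun acc n => if n ∈ fk then PySem.Set.add acc n else acc) acc ↔
        y ∈ acc ∨ (y ∈ cl ∧ y ∈ fk) := by
  induction cl with
  | nil => simp
  | cons c cs ih =>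
    intro acc y
    rw [List.foldl_cons, ih]
    by_cases hc : c ∈ fk
    · simp only [if_pos hc, PySem.Set.mem_add, List.mem_cons]
      constructor
      · rintro ((h | rfl) | h)
        · exact .inl h
        · exact .inr ⟨.inl rfl, hc⟩
        · exact .inr ⟨.inr h.1, h.2⟩
      · rintro (h | ⟨rfl | h, hf⟩)
        · exact .inl (.inl h)
        · exact .inl (.inr rfl)
        · exact .inr ⟨h, hf⟩
    · simp only [if_neg hc, List.mem_cons]
      constructor
      · rintro (h | h)
        · exact .inl h
        · exact .inr ⟨.inr h.1, h.2⟩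
      · rintro (h | ⟨rfl | h, hf⟩)
        · exact .inl h
        · exact absurd hf hc
        · exact .inr ⟨h, hf⟩

theorem inner_fold_nodup (fk : List (Int × Int)) (cl : List (Int × Int)) :
    ∀ (acc : PySem.Set (Int × Int)), acc.Nodup →
      (cl.foldl (fun acc n => if n ∈ fk then PySem.Set.add acc n else acc) acc).Nodup := by
  induction cl with
  | nil => exact fun acc h => h
  | cons c cs ih =>
    intro acc h
    rw [List.foldl_cons]
    split
    · exact ih _ (PySem.Set.nodup_add _ _ h)
    · exact ih _ h

theorem inner_fold_prefix (fk : List (Int × Int)) (cl : List (Int × Int)) :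
    ∀ (acc : PySem.Set (Int × Int)),
      acc <+: cl.foldl (fun acc n => if n ∈ fk then PySem.Set.add acc n else acc) acc := by
  induction cl with
  | nil => exact fun acc => List.prefix_refl acc
  | cons c cs ih =>
    intro acc
    rw [List.foldl_cons]
    split
    · refine List.IsPrefix.trans ?_ (ih _)
      rw [PySem.Set.add_eq_ite]
      split
      · exact List.prefix_refl acc
      · exact ⟨[c], rfl⟩
    · exact ih acc

theorem expandB_mem (fk : List (Int × Int)) (s : PySem.Set (Int × Int)) (y : Int × Int) :
    y ∈ expandB fk s ↔ y ∈ s ∨ ∃ x ∈ s, adj x y ∧ y ∈ fk := by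
  unfold expandB
  have main : ∀ (l : List (Int × Int)) (acc : PySem.Set (Int × Int)),
      y ∈ l.foldl (fun acc p => (nbrs p).foldl
        (fun acc n => if n ∈ fk then PySem.Set.add acc n else acc) acc) acc ↔
      y ∈ acc ∨ ∃ x ∈ l, adj x y ∧ y ∈ fk := by
    intro l
    induction l with
    | nil => simp
    | cons p ps ih =>
      intro acc
      rw [List.foldl_cons, ih, inner_fold_mem]
      simp only [List.mem_cons, adj]
      constructor
      · rintro ((h | h) | ⟨x, hx, hxy, hf⟩)
        · exact .inl h
        · exact .inr ⟨p, .inl rfl, h.1, h.2⟩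
        · exact .inr ⟨x, .inr hx, hxy, hf⟩
      · rintro (h | ⟨x, rfl | hx, hxy, hf⟩)
        · exact .inl (.inl h)
        · exact .inl (.inr ⟨hxy, hf⟩)
        · exact .inr ⟨x, hx, hxy, hf⟩
  exact main s s

theorem expandB_nodup (fk : List (Int × Int)) {s : PySem.Set (Int × Int)} (h : s.Nodup) :
    (expandB fk s).Nodup := by
  unfold expandB
  have main : ∀ (l : List (Int × Int)) (acc : PySem.Set (Int × Int)), acc.Nodup →
      (l.foldl (fun acc p => (nbrs p).foldl
        (fun acc n => if n ∈ fk then PySem.Set.add acc n else acc) acc) acc).Nodup := by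
    intro l
    induction l with
    | nil => exact fun acc h => h
    | cons p ps ih => exact fun acc h => ih _ (inner_fold_nodup fk (nbrs p) acc h)
  exact main s s h

theorem expandB_prefix (fk : List (Int × Int)) (s : PySem.Set (Int × Int)) :
    s <+: expandB fk s := by
  unfold expandB
  have main : ∀ (l : List (Int × Int)) (acc : PySem.Set (Int × Int)),
      acc <+: l.foldl (fun acc p => (nbrs p).foldl
        (fun acc n => if n ∈ fk then PySem.Set.add acc n else acc) acc) acc := by
    intro l
    induction l with
    | nil => exact fun acc => List.prefix_refl acc
    | cons p ps ih =>
      intro acc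
      exact List.IsPrefix.trans (inner_fold_prefix fk (nbrs p) acc) (ih _)
  exact main s s

theorem sat_sound (fk : List (Int × Int)) (start : Int × Int) :
    ∀ n (s : PySem.Set (Int × Int)), (∀ y ∈ s, ReachP (· ∈ fk) start y) →
      ∀ y ∈ saturateB fk n s, ReachP (· ∈ fk) start y := by
  intro n
  induction n with
  | zero => exact fun s h => h
  | succ n ih =>
    intro s h y
    rw [saturateB]
    split
    · exact h y
    · refine ih _ ?_ y
      intro z hz
      rcases (expandB_mem fk s z).1 hz with h1 | ⟨x, hx, hxy, hf⟩
      · exact h z h1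
      · exact .tail (h x hx) hf hxy

theorem sat_subset (fk : List (Int × Int)) :
    ∀ n (s : PySem.Set (Int × Int)), ∀ y ∈ s, y ∈ saturateB fk n s := by
  intro n
  induction n with
  | zero => exact fun s y h => h
  | succ n ih =>
    intro s y h
    rw [saturateB]
    split
    · exact h
    · exact ih _ y ((expandB_prefix fk s).subset h)

theorem nodup_subset_length {l l' : List (Int × Int)} (h : l.Nodup) (hs : ∀ x ∈ l, x ∈ l') :
    l.length ≤ l'.length :=
  calc l.length = l.toFinset.card := (List.toFinset_card_of_nodup h).symm
    _ ≤ l'.toFinset.card := Finset.card_le_card (by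
        intro x hx; rw [List.mem_toFinset] at *; exact hs x hx)
    _ ≤ l'.length := l'.toFinset_card_le

theorem sat_closed (fk : List (Int × Int)) :
    ∀ n (s : PySem.Set (Int × Int)), s.Nodup → (∀ y ∈ s, y ∈ fk) →
      fk.length + 1 ≤ s.length + n →
      ∀ y ∈ saturateB fk n s, ∀ z, adj y z → z ∈ fk → z ∈ saturateB fk n s := by
  intro n
  induction n with
  | zero =>
    intro s hnd hsub hlen
    exact absurd (nodup_subset_length hnd hsub) (by omega)
  | succ n ih =>
    intro s hnd hsub hlen y
    rw [saturateB]
    split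
    · -- stable: expandB fk s = s, so s is already closed
      next hlenEq =>
      have heq : expandB fk s = s := ((expandB_prefix fk s).eq_of_length hlenEq.symm).symm
      intro hy z hadj hzf
      have : z ∈ expandB fk s := (expandB_mem fk s z).2 (.inr ⟨y, hy, hadj, hzf⟩)
      rwa [heq] at this
    · next hlenNe =>
      refine ih (expandB fk s) (expandB_nodup fk hnd) ?_ ?_ y
      · intro z hz
        rcases (expandB_mem fk s z).1 hz with h1 | ⟨x, _, _, hf⟩
        · exact hsub z h1
        · exact hf
      · have hpre := expandB_prefix fk s
        have hle := hpre.length_le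
        omega

theorem sat_main (fk : List (Int × Int)) (start : Int × Int)
    (hs : start ∈ fk) (y : Int × Int) :
    y ∈ saturateB fk fk.length (PySem.Set.ofList [start]) ↔ ReachP (· ∈ fk) start y := by
  have hof : PySem.Set.ofList [start] = [start] := rfl
  constructor
  · refine sat_sound fk start fk.length _ ?_ y
    intro z hz
    rw [hof, List.mem_singleton] at hz
    exact hz ▸ .refl
  · refine reach_subset_of_closed ?_ ?_ y
    · exact sat_subset fk fk.length _ start (by rw [hof]; exact List.mem_singleton_self start)
    · intro a z ha hzf hadj
      refine sat_closed fk fk.length _ ?_ ?_ ?_ a ha z hadj hzf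
      · rw [hof]; exact List.nodup_singleton start
      · rw [hof]; intro w hw; rw [List.mem_singleton] at hw; exact hw ▸ hs
      · rw [hof]; simp

-- the two grouping loops produce the same list of representatives
theorem outer_ind (ks : List (Int × Int)) (d0 : PySem.Dict (Int × Int) Bool) :
    ∀ (l : List (Int × Int)), (∀ x ∈ l, x ∈ ks) →
    ∀ (d : PySem.Dict (Int × Int) Bool) (seen : PySem.Set (Int × Int))
      (gA gB : List (Int × Int)),
      (∀ y, d.getD y false = (d0.getD y false || decide (y ∈ seen))) →
      d.keys = ks →
      (∀ y ∈ seen, openP ks d0 y) →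
      (∀ y z, y ∈ seen → openP ks d0 z → adj y z → z ∈ seen) →
      gA = gB →
      (l.foldl
        (fun s start =>
          if s.1.getD start false then s
          else
            let r := bfsA ks (ks.length + 2) (s.1.insert start true) [start] start
            (r.1, s.2 ++ [r.2])) (d, gA)).2 =
      (l.foldl
        (fun s start =>
          if !(d0.getD start false) then
            (if start ∈ s.1 then s
             else
               let comp := saturateB (ks.filter (fun k => !(d0.getD k false)))
                 (ks.filter (fun k => !(d0.getD k false))).length (PySem.Set.ofList [start])
               (PySem.Set.update s.1 comp, s.2 ++ [minList comp]))
          else s) (seen, gB)).2 := by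
  intro l
  induction l with
  | nil =>
    intro _ d seen gA gB _ _ _ _ hg
    exact hg
  | cons k l ih =>
    intro hl d seen gA gB hR1 hR2 hR3 hR4 hg
    have hkks : k ∈ ks := hl k List.mem_cons_self
    have hl' : ∀ x ∈ l, x ∈ ks := fun x hx => hl x (List.mem_cons_of_mem k hx)
    rw [List.foldl_cons, List.foldl_cons]
    cases hval : d0.getD k false with
    | true =>
      have hA : d.getD k false = true := by rw [hR1 k, hval, Bool.true_or]
      dsimp only
      rw [hA]
      simp only [Bool.not_true, Bool.false_eq_true, if_false]
      exact ih hl' d seen gA gB hR1 hR2 hR3 hR4 hg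
    | false =>
      by_cases hkseen : k ∈ seen
      · have hA : d.getD k false = true := by
          rw [hR1 k, hval, decide_eq_true hkseen, Bool.or_true]
        dsimp only
        rw [hA]
        simp only [Bool.not_false, if_true]
        rw [if_pos hkseen]
        exact ih hl' d seen gA gB hR1 hR2 hR3 hR4 hg
      · -- k starts a new component in both programs
        have hdk : d.getD k false = false := by
          rw [hR1 k, hval, decide_eq_false hkseen, Bool.or_false]
        set fk := ks.filter (fun k => !(d0.getD k false)) with hfk
        have hfkmem : ∀ y, y ∈ fk ↔ openP ks d0 y := by
          intro y
          rw [hfk, List.mem_filter, openP]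
          constructor
          · rintro ⟨h1, h2⟩
            rw [Bool.not_eq_eq_eq_not, Bool.not_true] at h2
            exact ⟨h1, h2⟩
          · rintro ⟨h1, h2⟩
            rw [h2]
            exact ⟨h1, rfl⟩
        have hOpen_iff : ∀ y, openP ks d y ↔ (openP ks d0 y ∧ y ∉ seen) := by
          intro y
          unfold openP
          rw [hR1 y]
          constructor
          · rintro ⟨h1, h2⟩
            rcases Bool.or_eq_false_iff.1 h2 with ⟨h3, h4⟩
            exact ⟨⟨h1, h3⟩, of_decide_eq_false h4⟩
          · rintro ⟨⟨h1, h3⟩, h4⟩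
            exact ⟨h1, by rw [h3, decide_eq_false h4, Bool.or_false]⟩
        -- run A's BFS
        have hOk : openP ks d k := ⟨hkks, hdk⟩
        have hM' : ∀ y, (d.insert k true).getD y false =
            (d.getD y false || decide (y ∈ ({k} : Finset (Int × Int)))) := by
          intro y
          rw [PySem.Dict.getD_insert]
          by_cases hy : y = k
          · subst hy; simp [hdk]
          · rw [if_neg hy]
            simp [hy]
        have hk' : (d.insert k true).keys = ks := by
          rw [PySem.Dict.keys_insert_of_contains d true ?_, hR2]
          rw [PySem.Dict.contains_eq_decide_mem_keys, hR2]
          exact decide_eq_true hkks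
        have hfuel : [k].length +
            ((ks.toFinset.filter (fun y => d.getD y false = false)) \ ({k} : Finset (Int × Int))).card ≤
            ks.length + 2 := by
          have h1 : ((ks.toFinset.filter (fun y => d.getD y false = false)) \ ({k} : Finset (Int × Int))).card ≤
              (ks.toFinset.filter (fun y => d.getD y false = false)).card :=
            Finset.card_le_card (Finset.sdiff_subset)
          have h2 : (ks.toFinset.filter (fun y => d.getD y false = false)).card ≤ ks.toFinset.card :=
            Finset.card_filter_le _ _
          have h3 : ks.toFinset.card ≤ ks.length := ks.toFinset_card_le
          simp only [List.length_cons, List.length_nil]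
          omega
        obtain ⟨M', hMiff, hg1, hg2, hg3, hg4⟩ :=
          bfs_main ks d k (ks.length + 2) (d.insert k true) [k] k ({k} : Finset (Int × Int)) hM' hk'
            (by intro y hy; rw [Finset.mem_singleton] at hy; exact hy ▸ hOk)
            (by intro y hy; rw [Finset.mem_singleton] at hy; exact hy ▸ .refl)
            (by intro y hy; rw [List.mem_singleton] at hy; exact hy ▸ Finset.mem_singleton_self k)
            (List.nodup_singleton k)
            (by
              intro y hy hynot
              rw [Finset.mem_singleton] at hy
              exact absurd (hy ▸ List.mem_singleton_self k) hynot)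
            ⟨Finset.mem_singleton_self k, by
              intro y hy; rw [Finset.mem_singleton] at hy; exact hy ▸ pleP_refl k⟩
            (Finset.mem_singleton_self k) hfuel
        -- B's saturation computes the same component
        have hkfk : k ∈ fk := (hfkmem k).2 ⟨hkks, hval⟩
        have hsat := sat_main fk k hkfk
        have hreach_iff : ∀ y, ReachP (openP ks d) k y ↔ ReachP (· ∈ fk) k y := by
          intro y
          constructor
          · intro h
            refine reach_mono (fun z hz => ?_) h
            exact (hfkmem z).2 ((hOpen_iff z).1 hz).1
          · intro h
            have h0 : ReachP (fun z => openP ks d0 z) k y :=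
              reach_mono (fun z hz => (hfkmem z).1 hz) h
            have h1 := reach_restrict (P := fun z => openP ks d0 z) (A := fun z => z ∈ seen)
              (fun a b ha hb hadj => hR4 a b ha hb hadj) hkseen ⟨hkks, hval⟩ y h0
            exact reach_mono (fun z hz => (hOpen_iff z).2 hz) h1.1
        have hMC : ∀ y, y ∈ M' ↔ y ∈ saturateB fk fk.length (PySem.Set.ofList [k]) := by
          intro y
          rw [hMiff y, hsat y, hreach_iff y]
        set comp := saturateB fk fk.length (PySem.Set.ofList [k]) with hcomp
        set r := bfsA ks (ks.length + 2) (d.insert k true) [k] k with hr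
        -- the two representatives agree
        have hkM' : k ∈ M' := (hMiff k).2 .refl
        have hkcomp : k ∈ comp := (hMC k).1 hkM'
        obtain ⟨hmin_mem, hmin_le⟩ := minList_spec (List.ne_nil_of_mem hkcomp)
        have hrep_eq : r.2 = minList comp :=
          min_ext (S := (· ∈ comp)) ((hMC r.2).1 hg3) hmin_mem
            (fun y hy => hg4 y ((hMC y).2 hy)) hmin_le
        -- reduce both steps
        dsimp only
        rw [hdk]
        simp only [Bool.not_false, if_true]
        rw [if_neg hkseen]
        -- new invariants
        have hR1' : ∀ y, r.1.getD y false =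
            (d0.getD y false || decide (y ∈ PySem.Set.update seen comp)) := by
          intro y
          rw [hg1 y, hR1 y, Bool.or_assoc, ← Bool.decide_or,
            decide_eq_decide.2 (show (y ∈ seen ∨ y ∈ M') ↔ y ∈ PySem.Set.update seen comp by
              rw [PySem.Set.mem_update, hMC y])]
        have hR3' : ∀ y ∈ PySem.Set.update seen comp, openP ks d0 y := by
          intro y hy
          rcases (PySem.Set.mem_update _ _ _).1 hy with h | h
          · exact hR3 y h
          · rcases reach_elem ((hreach_iff y).2 ((hsat y).1 h)) with h2 | h2
            · exact h2 ▸ ⟨hkks, hval⟩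
            · exact (hOpen_iff y).1 h2 |>.1
        have hR4' : ∀ y z, y ∈ PySem.Set.update seen comp → openP ks d0 z → adj y z →
            z ∈ PySem.Set.update seen comp := by
          intro y z hy hz hadj
          rcases (PySem.Set.mem_update _ _ _).1 hy with h | h
          · exact (PySem.Set.mem_update _ _ _).2 (.inl (hR4 y z h hz hadj))
          · refine (PySem.Set.mem_update _ _ _).2 (.inr ?_)
            have hry : ReachP (· ∈ fk) k y := (hsat y).1 h
            exact (hsat z).2 (.tail hry ((hfkmem z).2 hz) hadj)
        exact ih hl' r.1 (PySem.Set.update seen comp) (gA ++ [r.2])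
          (gB ++ [minList comp]) hR1' hg2 hR3' hR4' (by rw [hg, hrep_eq])
  

theorem groups_eq (coords : List (Int × Int × Bool)) :
    (phase1A (buildDict coords).keys (buildDict coords)).2 =
      phase1B ((buildDict coords).keys.filter (fun k => !((buildDict coords).getD k false))) := by
  set d0 := buildDict coords with hd0
  unfold phase1A phase1B
  rw [← PySem.List.foldl_if_eq_foldl_filter (fun k => !(d0.getD k false))
    (fun (s : PySem.Set (Int × Int) × List (Int × Int)) start =>
      if start ∈ s.1 then s
      else
        let comp := saturateB (d0.keys.filter (fun k => !(d0.getD k false)))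
          (d0.keys.filter (fun k => !(d0.getD k false))).length (PySem.Set.ofList [start])
        (PySem.Set.update s.1 comp, s.2 ++ [minList comp]))]
  exact outer_ind d0.keys d0 d0.keys (fun x h => h) d0 PySem.Set.empty [] []
    (fun y => by simp [PySem.Set.empty])
    rfl
    (fun y hy => absurd hy List.not_mem_nil)
    (fun y z hy _ _ => absurd hy List.not_mem_nil)
    rfl

-- ===== VERDICT (by name: the statement is the Claim_ definition above) =====
theorem process_spec : Claim_equal_process := by
  intro coords _
  show process coords = process_alt coords
  simp only [process, process_alt]
  rw [groups_eq]
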